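-- pv_equiv track=rewrite | github.com/mehboob23/DSP-1 | BASICS/BASIC12(M FIBONACCI).PY | find_nth_multiple_of_number
-- ===== SOURCE A (Python) =====
-- def find_nth_multiple_of_number(n, number):
--     fib_sequence = [0, 1]
--
--     while True:
--         current = fib_sequence[-1] + fib_sequence[-2]
--         fib_sequence.append(current)
--
--         if current % number == 0:
--             n -= 1
--             if n == 0:
--                 return current
-- ===== SOURCE B (Python) =====
-- def _fib_pair(k):
--     # (F(k), F(k+1)) by fast doubling
--     if k == 0:
--         return (0, 1)
--     a, b = _fib_pair(k // 2)
--     c = a * (2 * b - a)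
--     d = a * a + b * b
--     if k % 2 == 0:
--         return (c, d)
--     return (d, c + d)
--
-- def find_nth_multiple_of_number(n, number):
--     m = abs(number)
--     if m == 1:
--         # every Fibonacci number is a multiple of 1; A starts at F(2)
--         return _fib_pair(n + 1)[0]
--     # rank of apparition: smallest k >= 1 with m | F(k) (iterating mod m)
--     a, b, k = 1 % m, 1 % m, 1
--     while a != 0:
--         a, b = b, (a + b) % m
--         k += 1
--     # multiples of m among Fibonacci numbers are exactly F(k), F(2k), ...
--     return _fib_pair(n * k)[0]
-- ===== Notes on version B (the rewrite author's own statement) =====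
-- stated objective: faster
-- what changed: Instead of generating every Fibonacci number and testing each for divisibility, B finds the rank of apparition k (smallest index with m | F(k)) by a cheap modular loop and returns F(n*k) directly via fast doubling.
import Mathlib
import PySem

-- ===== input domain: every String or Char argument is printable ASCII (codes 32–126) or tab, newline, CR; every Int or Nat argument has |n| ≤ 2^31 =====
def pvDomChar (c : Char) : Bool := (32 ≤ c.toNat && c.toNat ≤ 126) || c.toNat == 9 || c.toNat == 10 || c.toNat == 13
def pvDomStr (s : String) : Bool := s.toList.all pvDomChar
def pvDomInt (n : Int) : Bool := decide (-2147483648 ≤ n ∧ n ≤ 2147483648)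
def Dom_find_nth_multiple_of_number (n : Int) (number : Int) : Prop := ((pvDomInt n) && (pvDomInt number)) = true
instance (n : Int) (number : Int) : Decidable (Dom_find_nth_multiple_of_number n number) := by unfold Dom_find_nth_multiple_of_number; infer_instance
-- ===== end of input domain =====

-- B replaces A's scan of all Fibonacci numbers by the rank of apparition plus fast doubling (measurably faster).

-- ===== PORT A =====
-- A's `while True` loop; the Nat argument is a fuel guard making the same computation
-- total (proved sufficient under Pre_).  `fib_sequence` is kept in REVERSE so that
-- Python's O(1) list append and O(1) reads fib_sequence[-1] / fib_sequence[-2] stay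
-- O(1): they become `current :: seq` and positions 0 and 1 of the reversed list; the
-- list always has ≥ 2 elements, so the `.getD 0` defaults are never used.
def pvLoopA (number : Int) : Nat → List Int → Int → Int
  | 0, _, _ => 0
  | fuel+1, seq, n =>
    let current := (PySem.List.pyGet? seq 0).getD 0 + (PySem.List.pyGet? seq 1).getD 0
    let seq' := current :: seq
    if PySem.Int.mod current number = 0 then
      if n - 1 = 0 then current else pvLoopA number fuel seq' (n - 1)
    else pvLoopA number fuel seq' n

def find_nth_multiple_of_number (n : Int) (number : Int) : Int :=
  pvLoopA number ((n.toNat + 1) * (number.natAbs * number.natAbs + 1) + 2) [1, 0] n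

-- ===== PORT B =====
-- (F(k), F(k+1)) by fast doubling, as in Source B's _fib_pair
def pvFdPair (k : Nat) : Int × Int :=
  if h : k = 0 then (0, 1)
  else
    let p := pvFdPair (k / 2)
    let a := p.1
    let b := p.2
    let c := a * (2 * b - a)
    let d := a * a + b * b
    if k % 2 = 0 then (c, d) else (d, c + d)
decreasing_by exact Nat.div_lt_self (Nat.pos_of_ne_zero h) (by omega)

-- Source B's `while a != 0` rank-of-apparition loop; fuel guard proved sufficient under Pre_
def pvRankLoop (m : Int) : Nat → Int → Int → Int → Int
  | 0, _, _, k => k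
  | fuel+1, a, b, k =>
    if a ≠ 0 then pvRankLoop m fuel b (PySem.Int.mod (a + b) m) (k + 1) else k

def find_nth_multiple_of_number_alt (n : Int) (number : Int) : Int :=
  let m : Int := |number|
  if m = 1 then (pvFdPair (n + 1).toNat).1
  else
    let k := pvRankLoop m (number.natAbs * number.natAbs + 2) (PySem.Int.mod 1 m) (PySem.Int.mod 1 m) 1
    (pvFdPair (n * k).toNat).1

-- ===== PRECONDITION & SPEC =====
-- Pre_ excludes number = 0 (A raises ZeroDivisionError in `current % number`) and
-- n ≤ 0 (A never returns: its countdown can no longer reach 0).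
def Pre_find_nth_multiple_of_number (n : Int) (number : Int) : Prop := 1 ≤ n ∧ number ≠ 0
instance (n : Int) (number : Int) : Decidable (Pre_find_nth_multiple_of_number n number) := by unfold Pre_find_nth_multiple_of_number; infer_instance
def pvWitness_find_nth_multiple_of_number : Int × Int := (2, 4)

def Spec_find_nth_multiple_of_number (n : Int) (number : Int) (out : Int) : Prop := out = find_nth_multiple_of_number_alt n number
instance (n : Int) (number : Int) (out : Int) : Decidable (Spec_find_nth_multiple_of_number n number out) := by unfold Spec_find_nth_multiple_of_number; infer_instance

-- ===== CLAIM (what is proved, stated in full; the proofs are below) =====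
def Claim_equal_find_nth_multiple_of_number : Prop := ∀ (n : Int) (number : Int), Dom_find_nth_multiple_of_number n number → Pre_find_nth_multiple_of_number n number → Spec_find_nth_multiple_of_number n number (find_nth_multiple_of_number n number)

-- ===== LEMMAS AND PROOFS =====

-- rank of apparition of m: least positive index whose Fibonacci number m divides
noncomputable def pvAlpha (m : Nat) : Nat := sInf {d | 0 < d ∧ m ∣ Nat.fib d}

-- the pair of consecutive Fibonacci residues mod m
def pvG (m : Nat) (i : Nat) : ZMod m × ZMod m := ((Nat.fib i : ZMod m), (Nat.fib (i+1) : ZMod m))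

lemma pvG_step (m : Nat) (x y : Nat) (h : pvG m (x+1) = pvG m (y+1)) : pvG m x = pvG m y := by
  have h1 : (Nat.fib (x+1) : ZMod m) = (Nat.fib (y+1) : ZMod m) := congrArg Prod.fst h
  have h2 : (Nat.fib (x+2) : ZMod m) = (Nat.fib (y+2) : ZMod m) := congrArg Prod.snd h
  have ex : (Nat.fib (x+2) : ZMod m) = (Nat.fib x : ZMod m) + (Nat.fib (x+1) : ZMod m) := by
    rw [Nat.fib_add_two]; push_cast; ring
  have ey : (Nat.fib (y+2) : ZMod m) = (Nat.fib y : ZMod m) + (Nat.fib (y+1) : ZMod m) := by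
    rw [Nat.fib_add_two]; push_cast; ring
  have hx : (Nat.fib x : ZMod m) = (Nat.fib y : ZMod m) := by
    have h3 := h2
    rw [ex, ey, h1] at h3
    exact add_right_cancel h3
  unfold pvG
  rw [hx, h1]

lemma pvG_back (m : Nat) (i d : Nat) (h : pvG m i = pvG m (i + d)) : pvG m 0 = pvG m d := by
  induction i with
  | zero => simpa using h
  | succ i ih =>
      exact ih (pvG_step m i (i + d) (by simpa [Nat.add_right_comm] using h))

lemma pvExists (m : Nat) (hm : 0 < m) : ∃ d, 0 < d ∧ d ≤ m * m ∧ m ∣ Nat.fib d := by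
  haveI : NeZero m := ⟨hm.ne'⟩
  have hcard : (Finset.univ : Finset (ZMod m × ZMod m)).card < (Finset.range (m*m+1)).card := by
    simp [Finset.card_univ, ZMod.card]
  obtain ⟨x, hx, y, hy, hne, heq⟩ :=
    Finset.exists_ne_map_eq_of_card_lt_of_maps_to (s := Finset.range (m*m+1))
      (t := (Finset.univ : Finset (ZMod m × ZMod m))) hcard
      (f := fun i => pvG m i) (fun i _ => Finset.mem_univ (pvG m i))
  have key : ∀ a b : Nat, a < b → b ≤ m*m → pvG m a = pvG m b →
      ∃ d, 0 < d ∧ d ≤ m * m ∧ m ∣ Nat.fib d := by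
    intro a b hab hb hab2
    refine ⟨b - a, by omega, by omega, ?_⟩
    have h0 : pvG m 0 = pvG m (b - a) := by
      refine pvG_back m a (b - a) ?_
      rw [hab2]; congr 1; omega
    have hz : (Nat.fib (b - a) : ZMod m) = 0 := by
      have hfst := congrArg Prod.fst h0
      simpa [pvG] using hfst.symm
    exact (CharP.cast_eq_zero_iff (ZMod m) m _).mp hz
  rcases lt_or_gt_of_ne hne with h | h
  · exact key x y h (by have := Finset.mem_range.mp hy; omega) heq
  · exact key y x h (by have := Finset.mem_range.mp hx; omega) heq.symm

lemma pvAlpha_spec (m : Nat) (hm : 0 < m) : 0 < pvAlpha m ∧ m ∣ Nat.fib (pvAlpha m) := by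
  obtain ⟨d, hd1, _, hd3⟩ := pvExists m hm
  exact Nat.sInf_mem (⟨d, hd1, hd3⟩ : {d | 0 < d ∧ m ∣ Nat.fib d}.Nonempty)

lemma pvAlpha_min (m : Nat) (d : Nat) (hd : 0 < d) (hdvd : m ∣ Nat.fib d) : pvAlpha m ≤ d :=
  Nat.sInf_le ⟨hd, hdvd⟩

lemma pvAlpha_le_sq (m : Nat) (hm : 0 < m) : pvAlpha m ≤ m * m := by
  obtain ⟨d, hd1, hd2, hd3⟩ := pvExists m hm
  exact le_trans (pvAlpha_min m d hd1 hd3) hd2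

lemma pvAlpha_dvd_iff (m : Nat) (hm : 0 < m) (k : Nat) : m ∣ Nat.fib k ↔ pvAlpha m ∣ k := by
  obtain ⟨hA, hAd⟩ := pvAlpha_spec m hm
  constructor
  · intro hk
    rcases Nat.eq_zero_or_pos k with rfl | hkpos
    · exact dvd_zero _
    · have hg : m ∣ Nat.fib (Nat.gcd k (pvAlpha m)) := by
        rw [Nat.fib_gcd]; exact Nat.dvd_gcd hk hAd
      have hgpos : 0 < Nat.gcd k (pvAlpha m) := Nat.gcd_pos_of_pos_left _ hkpos
      have h1 : pvAlpha m ≤ Nat.gcd k (pvAlpha m) := pvAlpha_min m _ hgpos hg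
      have h2 : Nat.gcd k (pvAlpha m) ≤ pvAlpha m :=
        Nat.le_of_dvd hA (Nat.gcd_dvd_right _ _)
      have hge : Nat.gcd k (pvAlpha m) = pvAlpha m := le_antisymm h2 h1
      rw [← hge]
      exact Nat.gcd_dvd_left _ _
  · intro hk
    exact dvd_trans hAd (Nat.fib_dvd _ _ hk)

lemma pvLoopA_eq (number : Int) (hnum : number ≠ 0) (fuel : Nat) :
    ∀ (k : Nat) (rest : List Int) (n : Int), 1 ≤ n →
    pvAlpha number.natAbs * ((k+1) / pvAlpha number.natAbs + n.toNat) ≤ (k+1) + fuel →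
    pvLoopA number fuel ((Nat.fib (k+1) : Int) :: (Nat.fib k : Int) :: rest) n
      = (Nat.fib (pvAlpha number.natAbs * ((k+1) / pvAlpha number.natAbs + n.toNat)) : Int) := by
  have hm : 0 < number.natAbs := Int.natAbs_pos.mpr hnum
  obtain ⟨hA, _⟩ := pvAlpha_spec _ hm
  induction fuel with
  | zero =>
    intro k rest n hn hle
    exfalso
    have h1 := Nat.div_add_mod (k+1) (pvAlpha number.natAbs)
    have h2 : (k+1) % pvAlpha number.natAbs < pvAlpha number.natAbs := Nat.mod_lt _ hA
    have h3 : pvAlpha number.natAbs * ((k+1) / pvAlpha number.natAbs + n.toNat)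
        = pvAlpha number.natAbs * ((k+1) / pvAlpha number.natAbs)
          + pvAlpha number.natAbs * n.toNat := Nat.mul_add _ _ _
    have h4 : pvAlpha number.natAbs * 1 ≤ pvAlpha number.natAbs * n.toNat :=
      Nat.mul_le_mul_left _ (by omega)
    omega
  | succ fuel ih =>
    intro k rest n hn hle
    have hcur : (PySem.List.pyGet? ((Nat.fib (k+1) : Int) :: (Nat.fib k : Int) :: rest) 0).getD 0
        + (PySem.List.pyGet? ((Nat.fib (k+1) : Int) :: (Nat.fib k : Int) :: rest) 1).getD 0
        = (Nat.fib (k+1+1) : Int) := by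
      have h2 : PySem.List.pyGet? ((Nat.fib (k+1) : Int) :: (Nat.fib k : Int) :: rest) 1
          = some (Nat.fib k : Int) := by
        simp [PySem.List.pyGet?, PySem.List.pyIdx?]
      rw [PySem.List.pyGet?_zero_cons, h2]
      simp only [Option.getD_some]
      rw [Nat.fib_add_two]
      push_cast
      ring
    have hmodiff : (PySem.Int.mod (Nat.fib (k+1+1) : Int) number = 0)
        ↔ (pvAlpha number.natAbs ∣ (k+1+1)) := by
      rw [PySem.Int.mod_eq_zero_iff_dvd, ← Int.natAbs_dvd, Int.natCast_dvd_natCast]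
      exact pvAlpha_dvd_iff _ hm _
    simp only [pvLoopA]
    rw [hcur]
    by_cases hdvd : pvAlpha number.natAbs ∣ (k+1+1)
    · have hsd : (k+1+1) / pvAlpha number.natAbs = (k+1) / pvAlpha number.natAbs + 1 := by
        rw [Nat.succ_div]
        simp [hdvd]
      have hmul : pvAlpha number.natAbs * ((k+1+1) / pvAlpha number.natAbs) = k+1+1 :=
        Nat.mul_div_cancel' hdvd
      rw [if_pos (hmodiff.mpr hdvd)]
      by_cases hn1 : n - 1 = 0
      · rw [if_pos hn1]
        have harg : pvAlpha number.natAbs * ((k+1) / pvAlpha number.natAbs + n.toNat) = k+1+1 := by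
          have hnt : n.toNat = 1 := by omega
          rw [hnt, ← hsd, hmul]
        rw [harg]
      · rw [if_neg hn1]
        have harg : (k+1+1) / pvAlpha number.natAbs + (n-1).toNat
            = (k+1) / pvAlpha number.natAbs + n.toNat := by
          rw [hsd]; omega
        have hrec := ih (k+1) ((Nat.fib k : Int) :: rest) (n-1) (by omega) (by rw [harg]; omega)
        rw [hrec, harg]
    · have hsd : (k+1+1) / pvAlpha number.natAbs = (k+1) / pvAlpha number.natAbs := by
        rw [Nat.succ_div]
        simp [hdvd]
      rw [if_neg (fun h => hdvd (hmodiff.mp h))]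
      have hrec := ih (k+1) ((Nat.fib k : Int) :: rest) n hn (by rw [hsd]; omega)
      rw [hrec, hsd]

lemma pvA_closed (n number : Int) (hn : 1 ≤ n) (hnum : number ≠ 0) :
    find_nth_multiple_of_number n number
      = (Nat.fib (pvAlpha number.natAbs * (1 / pvAlpha number.natAbs + n.toNat)) : Int) := by
  have hm : 0 < number.natAbs := Int.natAbs_pos.mpr hnum
  have hA2 : pvAlpha number.natAbs ≤ number.natAbs * number.natAbs := pvAlpha_le_sq _ hm
  have hlist : ([1, 0] : List Int) = [(Nat.fib (0+1) : Int), (Nat.fib 0 : Int)] := by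
    norm_num
  have hbound : pvAlpha number.natAbs * (1 / pvAlpha number.natAbs + n.toNat)
      ≤ 1 + ((n.toNat + 1) * (number.natAbs * number.natAbs + 1) + 2) := by
    have c1 : pvAlpha number.natAbs * (1 / pvAlpha number.natAbs + n.toNat)
        ≤ pvAlpha number.natAbs * (1 + n.toNat) :=
      Nat.mul_le_mul_left _ (by have := Nat.div_le_self 1 (pvAlpha number.natAbs); omega)
    have c2 : pvAlpha number.natAbs * (1 + n.toNat)
        ≤ (number.natAbs * number.natAbs) * (1 + n.toNat) :=
      Nat.mul_le_mul_right _ hA2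
    have c3 : (number.natAbs * number.natAbs) * (1 + n.toNat)
        ≤ (n.toNat + 1) * (number.natAbs * number.natAbs + 1) := by
      rw [mul_comm]
      exact Nat.mul_le_mul (by omega) (by omega)
    omega
  unfold find_nth_multiple_of_number
  rw [hlist]
  exact pvLoopA_eq number hnum _ 0 [] n hn hbound

lemma pvFdPair_eq (k : Nat) : pvFdPair k = ((Nat.fib k : Int), (Nat.fib (k+1) : Int)) := by
  induction k using Nat.strong_induction_on with
  | _ k ih =>
    rw [pvFdPair]
    by_cases h0 : k = 0
    · subst h0; simp
    · set t := k / 2 with ht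
      have ih2 := ih t (ht ▸ Nat.div_lt_self (Nat.pos_of_ne_zero h0) (by omega))
      simp only [dif_neg h0, ih2]
      have hle : Nat.fib t ≤ 2 * Nat.fib (t + 1) :=
        le_trans Nat.fib_le_fib_succ (by omega)
      have hdm := Nat.div_add_mod k 2
      rw [← ht] at hdm
      by_cases he : k % 2 = 0
      · rw [if_pos he]
        simp only [Prod.mk.injEq]
        constructor
        · conv_rhs => rw [show k = 2 * t by omega]
          rw [Nat.fib_two_mul]
          push_cast [Nat.cast_sub hle]
          ring
        · conv_rhs => rw [show k + 1 = 2 * t + 1 by omega]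
          rw [Nat.fib_two_mul_add_one]
          push_cast
          ring
      · rw [if_neg he]
        simp only [Prod.mk.injEq]
        constructor
        · conv_rhs => rw [show k = 2 * t + 1 by omega]
          rw [Nat.fib_two_mul_add_one]
          push_cast
          ring
        · conv_rhs => rw [show k + 1 = 2 * t + 2 by omega]
          rw [Nat.fib_add_two, Nat.fib_two_mul, Nat.fib_two_mul_add_one]
          push_cast [Nat.cast_sub hle]
          ring

lemma pvRankLoop_eq (m : Nat) (hm : 2 ≤ m) (fuel : Nat) :
    ∀ (k : Nat), 1 ≤ k → k ≤ pvAlpha m → pvAlpha m ≤ k + fuel →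
    pvRankLoop (m : Int) fuel ((Nat.fib k : Int) % (m : Int)) ((Nat.fib (k+1) : Int) % (m : Int)) (k : Int)
      = (pvAlpha m : Int) := by
  have hm0 : 0 < m := by omega
  have hMpos : (0:Int) < (m : Int) := by exact_mod_cast hm0
  induction fuel with
  | zero =>
    intro k hk1 hkA hAk
    have hk : k = pvAlpha m := by omega
    simp [pvRankLoop, hk]
  | succ fuel ih =>
    intro k hk1 hkA hAk
    have hiff : ((Nat.fib k : Int) % (m : Int) = 0) ↔ pvAlpha m ∣ k := by
      rw [PySem.Int.emod_eq_zero_iff_dvd, Int.natCast_dvd_natCast]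
      exact pvAlpha_dvd_iff m hm0 k
    simp only [pvRankLoop]
    by_cases hz : (Nat.fib k : Int) % (m : Int) = 0
    · have hle : pvAlpha m ≤ k := Nat.le_of_dvd (by omega) (hiff.mp hz)
      have hk : k = pvAlpha m := by omega
      rw [if_neg (not_not_intro hz)]
      exact_mod_cast congrArg (Nat.cast : Nat → Int) hk
    · have hne : k ≠ pvAlpha m := fun he => hz (hiff.mpr (he ▸ dvd_refl _))
      rw [if_pos hz]
      have hb : PySem.Int.mod ((Nat.fib k : Int) % (m : Int) + (Nat.fib (k+1) : Int) % (m : Int)) (m : Int)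
          = (Nat.fib (k+1+1) : Int) % (m : Int) := by
        rw [PySem.Int.mod_eq_emod_of_pos hMpos, ← Int.add_emod]
        congr 1
        rw [Nat.fib_add_two]
        push_cast; ring
      rw [hb]
      have hcast : ((k : Int) + 1) = ((k+1 : Nat) : Int) := by push_cast; ring
      rw [hcast]
      exact ih (k+1) (by omega) (by omega) (by omega)

lemma pvAlpha_one : pvAlpha 1 = 1 := by
  have h := pvAlpha_spec 1 one_pos
  have h2 := pvAlpha_min 1 1 one_pos (one_dvd _)
  omega

lemma pvB_closed (n number : Int) (hn : 1 ≤ n) (hnum : number ≠ 0) :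
    find_nth_multiple_of_number_alt n number
      = (Nat.fib (pvAlpha number.natAbs * (1 / pvAlpha number.natAbs + n.toNat)) : Int) := by
  have hm : 0 < number.natAbs := Int.natAbs_pos.mpr hnum
  have habs : |number| = (number.natAbs : Int) := Int.abs_eq_natAbs number
  simp only [find_nth_multiple_of_number_alt]
  rw [habs]
  by_cases h1 : number.natAbs = 1
  · rw [if_pos (by rw [h1]; norm_num), pvFdPair_eq]
    have hnt : (n + 1).toNat = 1 * (1 / 1 + n.toNat) := by omega
    rw [h1, pvAlpha_one, ← hnt]
  · have hm2 : 2 ≤ number.natAbs := by omega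
    have hMpos : (0:Int) < (number.natAbs : Int) := by exact_mod_cast hm
    obtain ⟨hA, hAd⟩ := pvAlpha_spec _ hm
    have hA2 : pvAlpha number.natAbs ≠ 1 := by
      intro he
      rw [he, Nat.fib_one] at hAd
      exact h1 (Nat.dvd_one.mp hAd)
    have hAsq : pvAlpha number.natAbs ≤ number.natAbs * number.natAbs := pvAlpha_le_sq _ hm
    rw [if_neg (by exact_mod_cast h1)]
    try rw [habs]
    have hrank : pvRankLoop (number.natAbs : Int) (number.natAbs * number.natAbs + 2)
        (PySem.Int.mod 1 (number.natAbs : Int)) (PySem.Int.mod 1 (number.natAbs : Int)) 1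
        = (pvAlpha number.natAbs : Int) := by
      have h := pvRankLoop_eq number.natAbs hm2 (number.natAbs * number.natAbs + 2) 1
        le_rfl (by omega) (by omega)
      rw [PySem.Int.mod_eq_emod_of_pos hMpos]
      simpa [Nat.fib_one, Nat.fib_two] using h
    rw [hrank, pvFdPair_eq]
    have hmul : n * (pvAlpha number.natAbs : Int)
        = ((n.toNat * pvAlpha number.natAbs : Nat) : Int) := by
      push_cast [Int.toNat_of_nonneg (show (0:Int) ≤ n by omega)]
      ring
    rw [hmul, Int.toNat_natCast]
    have harg : n.toNat * pvAlpha number.natAbs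
        = pvAlpha number.natAbs * (1 / pvAlpha number.natAbs + n.toNat) := by
      rw [Nat.div_eq_of_lt (by omega), Nat.zero_add, Nat.mul_comm]
    rw [harg]

-- ===== VERDICT (by name: the statement is the Claim_ definition above) =====
theorem find_nth_multiple_of_number_spec : Claim_equal_find_nth_multiple_of_number := by
  intro n number _ hpre
  unfold Spec_find_nth_multiple_of_number
  rw [pvA_closed n number hpre.1 hpre.2, pvB_closed n number hpre.1 hpre.2]
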